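-- pv_equiv track=rewrite | github.com/NicholasKobald/snake2017-2018 | app/shared.py | get_displacement_for_each
-- ===== SOURCE A (Python) =====
-- def get_displacement_for_each(col, row, coord_list):
--     distances = dict()
--     for item in coord_list:
--         dist = abs(col - item[0]) + abs(row - item[1])
--         # insert into dictionary
--         # check if we already have another pair of coords for computed distances
--         if dist in distances:
--             distances[dist].append(item)
--         else:
--             distances[dist] = [item]
--     return distances
-- ===== SOURCE B (Python) =====
-- def get_displacement_for_each(col, row, coord_list):
--     dists = [abs(col - x) + abs(row - y) for (x, y) in coord_list]
--     return {d: [item for item, di in zip(coord_list, dists) if di == d]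
--             for d in dict.fromkeys(dists)}
-- ===== Notes on version B (the rewrite author's own statement) =====
-- stated objective: alternative
-- what changed: Replaces the incremental dict building loop (membership test then append-or-insert) with a declarative two-pass construction: compute all distances once, deduplicate them in first-occurrence order, and build each group by a single filtering comprehension over the zipped list.
import Mathlib
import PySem

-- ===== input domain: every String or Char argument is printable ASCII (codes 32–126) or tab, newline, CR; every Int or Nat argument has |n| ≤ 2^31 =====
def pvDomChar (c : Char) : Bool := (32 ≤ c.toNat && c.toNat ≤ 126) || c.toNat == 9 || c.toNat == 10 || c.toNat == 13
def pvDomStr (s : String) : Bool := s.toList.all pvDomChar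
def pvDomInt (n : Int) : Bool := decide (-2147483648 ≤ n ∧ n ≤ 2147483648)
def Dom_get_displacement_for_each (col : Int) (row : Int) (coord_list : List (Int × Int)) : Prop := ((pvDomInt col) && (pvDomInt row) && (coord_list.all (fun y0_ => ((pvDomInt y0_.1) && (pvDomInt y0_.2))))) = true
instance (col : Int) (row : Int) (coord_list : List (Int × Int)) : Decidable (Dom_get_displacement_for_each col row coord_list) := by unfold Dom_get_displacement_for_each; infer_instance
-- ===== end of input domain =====

-- B rebuilds the grouping declaratively: distances computed once, keys deduped in
-- first-occurrence order, each group produced by one filtering pass (alternative decomposition).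

-- ===== PORT A =====
-- for item in coord_list: dist = ...; if dist in distances: append else new singleton list
def get_displacement_for_each (col : Int) (row : Int) (coord_list : List (Int × Int)) : List (Int × List (Int × Int)) :=
  (coord_list.foldl (fun distances item =>
      let dist := |col - item.1| + |row - item.2|
      if distances.contains dist then
        distances.modify dist [] (fun l => l ++ [item])      -- distances[dist].append(item)
      else
        distances.insert dist [item])
    PySem.Dict.empty).items

-- ===== PORT B =====
def get_displacement_for_each_alt (col : Int) (row : Int) (coord_list : List (Int × Int)) : List (Int × List (Int × Int)) :=
  let dists := coord_list.map (fun it => |col - it.1| + |row - it.2|)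
  (PySem.List.dedup dists).map (fun d =>
    (d, ((coord_list.zip dists).filter (fun p => p.2 == d)).map (·.1)))

-- ===== PRECONDITION & SPEC =====
def Spec_get_displacement_for_each (col : Int) (row : Int) (coord_list : List (Int × Int)) (out : List (Int × List (Int × Int))) : Prop := out = get_displacement_for_each_alt col row coord_list
instance (col : Int) (row : Int) (coord_list : List (Int × Int)) (out : List (Int × List (Int × Int))) : Decidable (Spec_get_displacement_for_each col row coord_list out) := by unfold Spec_get_displacement_for_each; infer_instance

-- ===== CLAIM (what is proved, stated in full; the proofs are below) =====
def Claim_equal_get_displacement_for_each : Prop := ∀ (col : Int) (row : Int) (coord_list : List (Int × Int)), Dom_get_displacement_for_each col row coord_list → Spec_get_displacement_for_each col row coord_list (get_displacement_for_each col row coord_list)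

-- ===== LEMMAS AND PROOFS =====

-- A's branch (membership test, then in-place append or fresh singleton) is exactly Dict.modify.
theorem pv_step_eq_modify {d : PySem.Dict Int (List (Int × Int))} {k : Int} {it : Int × Int} :
    (if d.contains k then d.modify k [] (fun l => l ++ [it]) else d.insert k [it])
      = d.modify k [] (fun l => l ++ [it]) := by
  by_cases h : d.contains k = true
  · simp [h]
  · have hn : d.get? k = none := (PySem.Dict.get?_eq_none_iff_contains d k).mpr (by simpa using h)
    simp [h, PySem.Dict.modify, PySem.Dict.getD_eq_get?_getD, hn]

theorem pv_zip_map (l : List (Int × Int)) (f : (Int × Int) → Int) :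
    l.zip (l.map f) = l.map (fun x => (x, f x)) := by
  induction l with
  | nil => rfl
  | cons a t ih => simp [ih]

theorem get_displacement_for_each_eq_alt (col row : Int) (coord_list : List (Int × Int)) :
    get_displacement_for_each col row coord_list = get_displacement_for_each_alt col row coord_list := by
  unfold get_displacement_for_each get_displacement_for_each_alt
  set key : (Int × Int) → Int := fun it => |col - it.1| + |row - it.2| with hkey
  have hfold : (coord_list.foldl (fun distances item =>
      let dist := |col - item.1| + |row - item.2|
      if distances.contains dist then distances.modify dist [] (fun l => l ++ [item])
      else distances.insert dist [item]) PySem.Dict.empty)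
      = coord_list.foldl
          (fun d it => d.modify (key it) [] (fun l => l ++ [it])) PySem.Dict.empty := by
    apply PySem.List.foldl_congr_mem
    intro d it _
    exact pv_step_eq_modify
  rw [hfold]
  set D := coord_list.foldl (fun d it => d.modify (key it) [] (fun l => l ++ [it])) PySem.Dict.empty with hD
  have hnodup : D.keys.Nodup :=
    PySem.Dict.nodup_keys_foldl_modify_key coord_list key []
      (fun _ it l => l ++ [it]) PySem.Dict.empty (by simp)
  have hkeys : D.keys = PySem.List.dedup (coord_list.map key) := by
    rw [hD, PySem.Dict.keys_foldl_modify_key coord_list key [] (fun _ it l => l ++ [it])]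
    simp [PySem.Set.update_nil_left, PySem.List.dedup_eq_ofList]
  have hDmap : D = (coord_list.map (fun it => (key it, it))).foldl
      (fun d p => d.modify p.1 [] (fun x => x ++ [p.2])) PySem.Dict.empty := by
    rw [List.foldl_map]
  have hitems := PySem.Dict.items_eq_map_keys D hnodup []
  rw [hitems, hkeys]
  apply List.map_congr_left
  intro d _
  have hg : D.getD d [] = ((coord_list.map (fun it => (key it, it))).filter (fun p => p.1 == d)).map (·.2) := by
    rw [hDmap]
    simpa using PySem.Dict.getD_foldl_modify_append
      (l := coord_list.map (fun it => (key it, it))) (d := PySem.Dict.empty) (c := d)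
  rw [hg, pv_zip_map coord_list key]
  simp [List.filter_map, List.map_map, Function.comp_def]

-- ===== VERDICT (by name: the statement is the Claim_ definition above) =====
theorem get_displacement_for_each_spec : Claim_equal_get_displacement_for_each := by
  intro col row coord_list _
  unfold Spec_get_displacement_for_each
  exact get_displacement_for_each_eq_alt col row coord_list
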